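-- pv_equiv track=rewrite | github.com/WOLFY9527/daily_stock_analysis | src/services/rule_backtest_service.py | _dedupe_parsed_strategy_missing_fields
-- ===== SOURCE A (Python) =====
-- from typing import Any, Dict, List, Optional
--
-- PARSED_STRATEGY_FIELD_ORDER: List[str] = [
--     "version",
--     "timeframe",
--     "source_text",
--     "normalized_text",
--     "entry",
--     "exit",
--     "confidence",
--     "needs_confirmation",
--     "ambiguities",
--     "summary.entry",
--     "summary.exit",
--     "summary.strategy",
--     "max_lookback",
--     "strategy_kind",
--     "setup",
--     "strategy_spec.version",
--     "strategy_spec.strategy_type",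
--     "strategy_spec.strategy_family",
--     "strategy_spec.timeframe",
--     "strategy_spec.max_lookback",
--     "executable",
--     "normalization_state",
--     "assumptions",
--     "assumption_groups",
--     "detected_strategy_family",
--     "unsupported_reason",
--     "unsupported_details",
--     "unsupported_extensions",
--     "core_intent_summary",
--     "interpretation_confidence",
--     "supported_portion_summary",
--     "rewrite_suggestions",
--     "parse_warnings",
--     "strategy_spec.support.executable",
--     "strategy_spec.support.normalization_state",
--     "strategy_spec.support.requires_confirmation",
--     "strategy_spec.support.detected_strategy_family",
-- ]
--
-- def _dedupe_parsed_strategy_missing_fields(missing_fields: List[str]) -> List[str]: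
--     requested = [str(item or "").strip() for item in (missing_fields or []) if str(item or "").strip()]
--     ordered_fields = [field for field in PARSED_STRATEGY_FIELD_ORDER + ["stored_parsed_strategy"] if field in requested]
--     seen = set()
--     deduped: List[str] = []
--     for field in ordered_fields + requested:
--         normalized = str(field or "").strip()
--         if not normalized or normalized in seen:
--             continue
--         seen.add(normalized)
--         deduped.append(normalized)
--     return deduped
-- ===== SOURCE B (Python) =====
-- from typing import List
--
-- PARSED_STRATEGY_FIELD_ORDER: List[str] = [
--     "version",
--     "timeframe",
--     "source_text",
--     "normalized_text",
--     "entry",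
--     "exit",
--     "confidence",
--     "needs_confirmation",
--     "ambiguities",
--     "summary.entry",
--     "summary.exit",
--     "summary.strategy",
--     "max_lookback",
--     "strategy_kind",
--     "setup",
--     "strategy_spec.version",
--     "strategy_spec.strategy_type",
--     "strategy_spec.strategy_family",
--     "strategy_spec.timeframe",
--     "strategy_spec.max_lookback",
--     "executable",
--     "normalization_state",
--     "assumptions",
--     "assumption_groups",
--     "detected_strategy_family",
--     "unsupported_reason",
--     "unsupported_details",
--     "unsupported_extensions",
--     "core_intent_summary",
--     "interpretation_confidence",
--     "supported_portion_summary",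
--     "rewrite_suggestions",
--     "parse_warnings",
--     "strategy_spec.support.executable",
--     "strategy_spec.support.normalization_state",
--     "strategy_spec.support.requires_confirmation",
--     "strategy_spec.support.detected_strategy_family",
-- ]
--
-- _CANON_ALL: List[str] = PARSED_STRATEGY_FIELD_ORDER + ["stored_parsed_strategy"]
-- _RANK = {}
-- for _idx, _field in enumerate(_CANON_ALL):
--     _RANK[_field] = _idx
-- _SENTINEL = len(_CANON_ALL)
--
--
-- def _dedupe_parsed_strategy_missing_fields(missing_fields: List[str]) -> List[str]:
--     cleaned = [str(item or "").strip() for item in (missing_fields or [])]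
--     unique = list(dict.fromkeys(item for item in cleaned if item))
--     return sorted(unique, key=lambda field: _RANK.get(field, _SENTINEL))
-- ===== Notes on version B (the rewrite author's own statement) =====
-- stated objective: faster
-- what changed: Replaces A's 'filter the canonical field list by linear membership in the cleaned input, then run a seen-set dedupe loop over the concatenation' with a rank-table decomposition: build an index dict over the canonical order once, clean and first-occurrence-dedupe the input, and stably sort that unique list by rank, with a single sentinel rank for unknown fields.
import Mathlib
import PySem

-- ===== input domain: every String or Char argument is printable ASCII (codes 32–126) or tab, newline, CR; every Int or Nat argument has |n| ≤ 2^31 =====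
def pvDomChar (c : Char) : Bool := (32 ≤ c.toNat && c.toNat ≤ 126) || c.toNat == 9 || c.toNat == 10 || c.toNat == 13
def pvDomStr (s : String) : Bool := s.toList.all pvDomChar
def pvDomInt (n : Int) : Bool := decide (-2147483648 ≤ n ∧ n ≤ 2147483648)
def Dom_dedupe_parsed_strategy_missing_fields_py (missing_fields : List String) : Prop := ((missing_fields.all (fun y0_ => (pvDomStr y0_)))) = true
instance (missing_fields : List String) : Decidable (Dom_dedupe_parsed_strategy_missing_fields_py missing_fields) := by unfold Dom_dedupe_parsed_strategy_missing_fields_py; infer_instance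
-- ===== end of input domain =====

-- B replaces A's "filter the canonical list, then dedupe the concatenation" two-loop scheme by a
-- rank table + clean/dedupe + one stable sort by rank (objective: faster, measured).

-- PARSED_STRATEGY_FIELD_ORDER (module constant, shared by both versions)
def pvFieldOrder : List String := [
  "version", "timeframe", "source_text", "normalized_text", "entry", "exit",
  "confidence", "needs_confirmation", "ambiguities", "summary.entry", "summary.exit",
  "summary.strategy", "max_lookback", "strategy_kind", "setup", "strategy_spec.version",
  "strategy_spec.strategy_type", "strategy_spec.strategy_family", "strategy_spec.timeframe",
  "strategy_spec.max_lookback", "executable", "normalization_state", "assumptions",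
  "assumption_groups", "detected_strategy_family", "unsupported_reason", "unsupported_details",
  "unsupported_extensions", "core_intent_summary", "interpretation_confidence",
  "supported_portion_summary", "rewrite_suggestions", "parse_warnings",
  "strategy_spec.support.executable", "strategy_spec.support.normalization_state",
  "strategy_spec.support.requires_confirmation", "strategy_spec.support.detected_strategy_family"]

-- ===== PORT A =====
-- `str(item or "")` is the identity on a str argument ("" stays ""), so it is ported as the string itself.
def dedupe_parsed_strategy_missing_fields_py (missing_fields : List String) : List String :=
  let requested := (missing_fields.map (fun item => PySem.Str.strip item)).filter (fun s => s ≠ "")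
  let ordered := (pvFieldOrder ++ ["stored_parsed_strategy"]).filter (fun field => requested.contains field)
  let res := (ordered ++ requested).foldl
    (fun (acc : PySem.Set String × List String) field =>
      if PySem.Str.strip field = "" ∨ PySem.Set.contains acc.1 (PySem.Str.strip field) then acc
      else (PySem.Set.add acc.1 (PySem.Str.strip field), acc.2 ++ [PySem.Str.strip field]))
    (PySem.Set.empty, [])
  res.2

-- ===== PORT B =====
-- _CANON_ALL = PARSED_STRATEGY_FIELD_ORDER + ["stored_parsed_strategy"]
def pvCanonAll : List String := pvFieldOrder ++ ["stored_parsed_strategy"]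
-- _RANK = {} ; for _idx, _field in enumerate(_CANON_ALL): _RANK[_field] = _idx
def pvRank : PySem.Dict String Int :=
  (PySem.List.enumerate pvCanonAll).foldl (fun d p => d.insert p.2 p.1) PySem.Dict.empty

def dedupe_parsed_strategy_missing_fields_py_alt (missing_fields : List String) : List String :=
  let cleaned := missing_fields.map (fun item => PySem.Str.strip item)
  let unique := PySem.List.dedup (cleaned.filter (fun s => s ≠ ""))
  PySem.List.sorted unique (fun field => pvRank.getD field (pvCanonAll.length : Int)) false

-- ===== PRECONDITION & SPEC =====
def Spec_dedupe_parsed_strategy_missing_fields_py (missing_fields : List String) (out : List String) : Prop := out = dedupe_parsed_strategy_missing_fields_py_alt missing_fields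
instance (missing_fields : List String) (out : List String) : Decidable (Spec_dedupe_parsed_strategy_missing_fields_py missing_fields out) := by unfold Spec_dedupe_parsed_strategy_missing_fields_py; infer_instance

-- ===== CLAIM (what is proved, stated in full; the proofs are below) =====
def Claim_equal_dedupe_parsed_strategy_missing_fields_py : Prop := ∀ (missing_fields : List String), Dom_dedupe_parsed_strategy_missing_fields_py missing_fields → Spec_dedupe_parsed_strategy_missing_fields_py missing_fields (dedupe_parsed_strategy_missing_fields_py missing_fields)

-- ===== LEMMAS AND PROOFS =====

-- strip is idempotent
lemma pv_dropWhile_idem (p : Char → Bool) (l : List Char) :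
    List.dropWhile p (List.dropWhile p l) = List.dropWhile p l := by
  have h := List.head?_dropWhile_not p l
  cases hd : List.dropWhile p l with
  | nil => simp
  | cons a t =>
    rw [hd] at h
    simp only [List.head?_cons] at h
    simp [h]

lemma pv_strip_idem (s : String) : PySem.Str.strip (PySem.Str.strip s) = PySem.Str.strip s := by
  have key : ∀ l : List Char, PySem.Chars.strip (PySem.Chars.strip l) = PySem.Chars.strip l := by
    intro l
    unfold PySem.Chars.strip PySem.Chars.rstrip PySem.Chars.lstrip
    set p := PySem.Chars.isspace
    set m := List.dropWhile p l with hm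
    have hsuf : (List.dropWhile p m.reverse) <:+ m.reverse := List.dropWhile_suffix p
    have hpre : (List.dropWhile p m.reverse).reverse <+: m := by
      have := hsuf.reverse
      simpa using this
    have hmhead := List.head?_dropWhile_not p l
    rw [← hm] at hmhead
    have inner : List.dropWhile p (List.dropWhile p m.reverse).reverse
        = (List.dropWhile p m.reverse).reverse := by
      cases hr : (List.dropWhile p m.reverse).reverse with
      | nil => simp
      | cons a t =>
        have ha : p a = false := by
          rcases hpre with ⟨suf, hsufm⟩
          rw [hr] at hsufm
          cases hm2 : m with
          | nil => rw [hm2] at hsufm; simp at hsufm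
          | cons b u =>
            rw [hm2] at hsufm hmhead
            simp only [List.head?_cons] at hmhead
            have : a = b := by
              have := hsufm
              simp only [List.cons_append] at this
              exact (List.cons.injEq _ _ _ _ ▸ this).1
            rw [this]; exact hmhead
        simp [ha]
    rw [inner, List.reverse_reverse, pv_dropWhile_idem]
  have h2 : (PySem.Str.strip (PySem.Str.strip s)).toList = (PySem.Str.strip s).toList := by
    rw [PySem.Str.toList_strip, PySem.Str.toList_strip, key]
  exact String.toList_inj.mp h2

-- first-occurrence dedup relative to a seen list (proof-side model of both programs' dedup passes)
def pvDD : List String → List String → List String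
  | _, [] => []
  | s, y :: t => if y ∈ s then pvDD s t else y :: pvDD (s ++ [y]) t

lemma pvDD_mem (r : List String) : ∀ (s : List String) (z : String), z ∈ pvDD s r ↔ z ∈ r ∧ z ∉ s := by
  induction r with
  | nil => intro s z; simp [pvDD]
  | cons y t ih =>
    intro s z
    by_cases hy : y ∈ s
    · simp only [pvDD, if_pos hy, ih]
      constructor
      · rintro ⟨hz, hzs⟩; exact ⟨List.mem_cons_of_mem _ hz, hzs⟩
      · rintro ⟨hz, hzs⟩
        rcases List.mem_cons.mp hz with rfl | hz
        · exact absurd hy hzs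
        · exact ⟨hz, hzs⟩
    · simp only [pvDD, if_neg hy, List.mem_cons, ih]
      constructor
      · rintro (rfl | ⟨hz, hzs⟩)
        · exact ⟨Or.inl rfl, hy⟩
        · simp only [List.mem_append, List.mem_singleton] at hzs
          push_neg at hzs
          exact ⟨Or.inr hz, hzs.1⟩
      · rintro ⟨rfl | hz, hzs⟩
        · exact Or.inl rfl
        · by_cases hzy : z = y
          · exact Or.inl hzy
          · refine Or.inr ⟨hz, ?_⟩
            simp [hzs, hzy]

lemma pvDD_nodup (r : List String) : ∀ s : List String, (pvDD s r).Nodup := by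
  induction r with
  | nil => intro s; simp [pvDD]
  | cons y t ih =>
    intro s
    by_cases hy : y ∈ s
    · simp only [pvDD, if_pos hy]; exact ih s
    · simp only [pvDD, if_neg hy]
      refine List.nodup_cons.mpr ⟨?_, ih (s ++ [y])⟩
      intro hmem
      exact ((pvDD_mem t (s ++ [y]) y).mp hmem).2 (List.mem_append.mpr (Or.inr (by simp)))

lemma pvDD_append (xs ys : List String) : ∀ s, pvDD s (xs ++ ys) = pvDD s xs ++ pvDD (s ++ pvDD s xs) ys := by
  induction xs with
  | nil => intro s; simp [pvDD]
  | cons y t ih =>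
    intro s
    by_cases hy : y ∈ s
    · simp only [List.cons_append, pvDD, if_pos hy, ih]
    · simp only [List.cons_append, pvDD, if_neg hy, ih, List.append_assoc, List.cons_append,
        List.nil_append]

lemma pvDD_eq_self (xs : List String) : ∀ s, xs.Nodup → (∀ y ∈ xs, y ∉ s) → pvDD s xs = xs := by
  induction xs with
  | nil => intro s _ _; rfl
  | cons y t ih =>
    intro s hnd hdisj
    have hy : y ∉ s := hdisj y (List.mem_cons_self)
    simp only [pvDD, if_neg hy]
    congr 1
    apply ih _ (List.nodup_cons.mp hnd).2
    intro z hz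
    simp only [List.mem_append, List.mem_singleton]
    push_neg
    exact ⟨hdisj z (List.mem_cons_of_mem _ hz), fun h => (List.nodup_cons.mp hnd).1 (h ▸ hz)⟩

lemma pvDD_filter (r : List String) : ∀ (s s' : List String), (∀ y ∈ s', y ∈ s) →
    pvDD s r = (pvDD s' r).filter (fun y => decide (y ∉ s)) := by
  induction r with
  | nil => intro s s' _; simp [pvDD]
  | cons y t ih =>
    intro s s' hss
    by_cases hy' : y ∈ s'
    · have hy : y ∈ s := hss y hy'
      simp only [pvDD, if_pos hy, if_pos hy']
      exact ih s s' hss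
    · by_cases hy : y ∈ s
      · simp only [pvDD, if_pos hy, if_neg hy', List.filter_cons]
        rw [if_neg (by simp [hy])]
        · apply ih s (s' ++ [y])
          intro z hz
          rcases List.mem_append.mp hz with h | h
          · exact hss z h
          · simp only [List.mem_singleton] at h; exact h ▸ hy
      · simp only [pvDD, if_neg hy, if_neg hy', List.filter_cons]
        rw [if_pos (by simp [hy])]
        congr 1
        have step : pvDD (s ++ [y]) t = (pvDD (s' ++ [y]) t).filter (fun z => decide (z ∉ s ++ [y])) := by
          apply ih
          intro z hz
          rcases List.mem_append.mp hz with h | h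
          · exact List.mem_append.mpr (Or.inl (hss z h))
          · exact List.mem_append.mpr (Or.inr h)
        rw [step]
        apply List.filter_congr
        intro z hz
        have hzny : z ∉ s' ++ [y] := ((pvDD_mem t (s' ++ [y]) z).mp hz).2
        have : z ≠ y := fun h => hzny (List.mem_append.mpr (Or.inr (by simp [h])))
        simp [List.mem_append, this]

-- PySem ordered-dedup is pvDD from an empty seen list
lemma pv_foldl_add (xs : List String) : ∀ s, xs.foldl PySem.Set.add s = s ++ pvDD s xs := by
  induction xs with
  | nil => intro s; simp [pvDD]
  | cons y t ih =>
    intro s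
    by_cases hy : y ∈ s
    · have hc : PySem.Set.add s y = s := by simp [PySem.Set.add, hy]
      simp only [List.foldl_cons, hc, pvDD, if_pos hy, ih]
    · have hc : PySem.Set.add s y = s ++ [y] := by simp [PySem.Set.add, hy]
      simp only [List.foldl_cons, hc, pvDD, if_neg hy, ih, List.append_assoc, List.cons_append,
        List.nil_append]

lemma pv_dedup_eq (xs : List String) : PySem.List.dedup xs = pvDD [] xs := by
  have := pv_foldl_add xs []
  simpa [PySem.List.dedup, PySem.Set.ofList, PySem.Set.empty] using this

-- A's dedupe loop, on already clean (stripped, nonempty) fields, is pvDD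
lemma pv_foldA (xs : List String) (h : ∀ y ∈ xs, PySem.Str.strip y = y ∧ y ≠ "") :
    ∀ (s : List String) (d : List String),
      (xs.foldl
        (fun (acc : PySem.Set String × List String) field =>
          if PySem.Str.strip field = "" ∨ PySem.Set.contains acc.1 (PySem.Str.strip field) then acc
          else (PySem.Set.add acc.1 (PySem.Str.strip field), acc.2 ++ [PySem.Str.strip field]))
        (s, d)).2 = d ++ pvDD s xs := by
  induction xs with
  | nil => intro s d; simp [pvDD]
  | cons y t ih =>
    intro s d
    have hy := h y (List.mem_cons_self)
    have ht : ∀ z ∈ t, PySem.Str.strip z = z ∧ z ≠ "" := fun z hz => h z (List.mem_cons_of_mem _ hz)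
    by_cases hmem : y ∈ s
    · have hcond : (y = "" ∨ PySem.Set.contains s y = true) := by
        right; simp [PySem.Set.contains, List.contains_iff_mem, hmem]
      simp only [List.foldl_cons, hy.1]
      rw [if_pos hcond]
      simp only [pvDD, if_pos hmem]
      exact ih ht s d
    · have hcond : ¬ (y = "" ∨ PySem.Set.contains s y = true) := by
        push_neg
        exact ⟨hy.2, by simp [PySem.Set.contains, List.contains_iff_mem, hmem]⟩
      simp only [List.foldl_cons, hy.1]
      rw [if_neg hcond]
      have hadd : PySem.Set.add s y = s ++ [y] := by simp [PySem.Set.add, hmem]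
      rw [hadd]
      simp only [pvDD, if_neg hmem]
      rw [ih ht (s ++ [y]) (d ++ [y])]
      simp

lemma pv_insertBy_nil (before : String → String → Bool) (x : String) :
    PySem.List.insertBy before x [] = [x] := by simp [PySem.List.insertBy]

lemma pv_insertBy_cons (before : String → String → Bool) (x y : String) (ys : List String) :
    PySem.List.insertBy before x (y :: ys)
      = if before x y then x :: y :: ys else y :: PySem.List.insertBy before x ys := by
  simp [PySem.List.insertBy]

lemma pv_insertBy_front (before : String → String → Bool) (x : String) (L : List String)
    (h : ∀ y, L.head? = some y → before x y = true) :
    PySem.List.insertBy before x L = x :: L := by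
  cases L with
  | nil => simp [pv_insertBy_nil]
  | cons y ys => rw [pv_insertBy_cons, if_pos (h y rfl)]

-- inserting a canonical element into (canonical part ++ tail of strictly larger keys)
lemma pv_insert_into (k : String → Int) (c : List String) (hc : c.Pairwise (fun a b => k a < k b)) :
    ∀ (x : String), x ∈ c → ∀ (q : String → Bool), q x = false →
    ∀ (U : List String), (∀ y ∈ U, k x < k y) →
      PySem.List.insertBy (fun a b => decide (k a < k b)) x (c.filter q ++ U)
        = c.filter (fun y => q y || y == x) ++ U := by
  induction c with
  | nil => intro x hx; exact absurd hx (List.not_mem_nil)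
  | cons a c' ih =>
    intro x hx q hq U hU
    have hpair := (List.pairwise_cons.mp hc)
    by_cases hax : a = x
    · subst hax
      have hqa : q a = false := hq
      have hsmall : ∀ y ∈ c'.filter q ++ U, k a < k y := by
        intro y hy
        rcases List.mem_append.mp hy with h | h
        · exact hpair.1 y (List.mem_of_mem_filter h)
        · exact hU y h
      rw [List.filter_cons_of_neg (by simp [hqa])]
      rw [pv_insertBy_front _ _ _ (fun y hy => by
        have : y ∈ c'.filter q ++ U := List.mem_of_mem_head? hy
        simpa using hsmall y this)]
      rw [List.filter_cons_of_pos (by simp)]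
      congr 2
      apply List.filter_congr
      intro z hz
      have hzx : z ≠ a := by
        intro h'
        have := hpair.1 z hz
        rw [h'] at this
        exact lt_irrefl _ this
      simp [hzx]
    · have hx' : x ∈ c' := by
        rcases List.mem_cons.mp hx with h | h
        · exact absurd h.symm hax
        · exact h
      have hax' : k a < k x := hpair.1 x hx'
      by_cases hqa : q a = true
      · rw [List.filter_cons_of_pos hqa, List.cons_append, pv_insertBy_cons,
          if_neg (by simp; omega)]
        rw [List.filter_cons_of_pos (by simp [hqa]), List.cons_append]
        congr 1
        exact ih hpair.2 x hx' q hq U hU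
      · rw [List.filter_cons_of_neg hqa,
          List.filter_cons_of_neg (by simp [hqa, hax])]
        exact ih hpair.2 x hx' q hq U hU

-- stable sort by a rank that is strictly increasing along c and constant (= N) off c
lemma pv_sorted_split (k : String → Int) (N : Int) (c : List String)
    (hc : c.Pairwise (fun a b => k a < k b))
    (hIn : ∀ y ∈ c, k y < N) (hOut : ∀ y : String, y ∉ c → k y = N) :
    ∀ u : List String, u.Nodup →
      PySem.List.sorted u k false
        = c.filter (fun y => decide (y ∈ u)) ++ u.filter (fun y => decide (y ∉ c)) := by
  intro u
  induction u using List.reverseRecOn with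
  | nil => intro _; simp [PySem.List.sorted_eq_foldl_insertBy]
  | append_singleton u' x ih =>
    intro hnd
    have hu' : u'.Nodup := (List.nodup_append.mp hnd).1
    have hxu' : x ∉ u' := by
      have h' := hnd
      simp [List.nodup_append] at h'
      tauto
    rw [PySem.List.sorted_eq_foldl_insertBy] at ih ⊢
    rw [List.foldl_append, List.foldl_cons, List.foldl_nil, ih hu']
    by_cases hxc : x ∈ c
    · have hresult := pv_insert_into k c hc x hxc (fun y => decide (y ∈ u')) (by simp [hxu'])
        (u'.filter (fun y => decide (y ∉ c)))
        (by
          intro y hy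
          have hy' := List.of_mem_filter hy
          simp only [decide_eq_true_eq] at hy'
          rw [hOut y hy']
          exact hIn x hxc)
      rw [hresult]
      congr 1
      · apply List.filter_congr
        intro z hz
        simp [List.mem_append, Bool.beq_eq_decide_eq]
      · rw [List.filter_append]
        have : [x].filter (fun y => decide (y ∉ c)) = [] := by simp [hxc]
        rw [this, List.append_nil]
    · rw [PySem.List.insertBy_of_forall_not_before]
      · rw [List.filter_append]
        have h1 : [x].filter (fun y => decide (y ∉ c)) = [x] := by simp [hxc]
        rw [h1]
        have h2 : c.filter (fun y => decide (y ∈ u' ++ [x])) = c.filter (fun y => decide (y ∈ u')) := by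
          apply List.filter_congr
          intro z hz
          have : z ≠ x := fun h => hxc (h ▸ hz)
          simp [List.mem_append, this]
        rw [h2, List.append_assoc]
      · intro y hy
        have hkx : k x = N := hOut x hxc
        rcases List.mem_append.mp hy with h | h
        · have : k y < N := hIn y (List.mem_of_mem_filter h)
          simp [hkx]; omega
        · have : y ∉ c := by simpa using List.of_mem_filter h
          have : k y = N := hOut y this
          simp [hkx, this]

-- facts about the canonical list and the rank table (kernel computations)
set_option maxHeartbeats 1000000 in
lemma pv_canon_nodup : pvCanonAll.Nodup := by decide

set_option maxHeartbeats 1000000 in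
lemma pv_canon_clean : ∀ y ∈ pvCanonAll, PySem.Str.strip y = y ∧ y ≠ "" := by decide

set_option maxHeartbeats 4000000 in
set_option maxRecDepth 100000 in
lemma pv_rank_map : pvCanonAll.map (fun y => pvRank.getD y (pvCanonAll.length : Int))
    = (List.range 38).map (fun n => (n : Int)) := by decide

set_option maxHeartbeats 4000000 in
set_option maxRecDepth 100000 in
lemma pv_rank_keys : pvRank.keys = pvCanonAll := by decide

lemma pv_rank_pairwise : pvCanonAll.Pairwise
    (fun a b => pvRank.getD a (pvCanonAll.length : Int) < pvRank.getD b (pvCanonAll.length : Int)) := by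
  have h : (pvCanonAll.map (fun y => pvRank.getD y (pvCanonAll.length : Int))).Pairwise
      (fun a b => a < b) := by
    rw [pv_rank_map]; decide
  exact List.pairwise_map.mp h

lemma pv_rank_in : ∀ y ∈ pvCanonAll, pvRank.getD y (pvCanonAll.length : Int) < (pvCanonAll.length : Int) := by
  intro y hy
  have hmem : pvRank.getD y (pvCanonAll.length : Int) ∈
      pvCanonAll.map (fun y => pvRank.getD y (pvCanonAll.length : Int)) := List.mem_map_of_mem hy
  rw [pv_rank_map] at hmem
  have hb : ∀ z ∈ (List.range 38).map (fun n => (n : Int)), z < 38 := by decide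
  have hlen : (pvCanonAll.length : Int) = 38 := by decide
  rw [hlen]
  exact hb _ hmem

lemma pv_rank_out : ∀ y : String, y ∉ pvCanonAll →
    pvRank.getD y (pvCanonAll.length : Int) = (pvCanonAll.length : Int) := by
  intro y hy
  have hnone : pvRank.get? y = none :=
    (PySem.Dict.get?_eq_none_iff_not_mem_keys pvRank y).mpr (by rw [pv_rank_keys]; exact hy)
  exact PySem.Dict.getD_of_get?_eq_none pvRank _ hnone

-- ===== VERDICT (by name: the statement is the Claim_ definition above) =====
theorem dedupe_parsed_strategy_missing_fields_py_spec : Claim_equal_dedupe_parsed_strategy_missing_fields_py := by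
  intro mf _
  unfold Spec_dedupe_parsed_strategy_missing_fields_py
  unfold dedupe_parsed_strategy_missing_fields_py dedupe_parsed_strategy_missing_fields_py_alt
  dsimp only
  rw [show pvFieldOrder ++ ["stored_parsed_strategy"] = pvCanonAll from rfl]
  set r := (mf.map (fun item => PySem.Str.strip item)).filter (fun s => s ≠ "") with hr
  set ordered := pvCanonAll.filter (fun field => r.contains field) with hordered
  set k := fun field => pvRank.getD field (pvCanonAll.length : Int) with hk
  have hclean_r : ∀ y ∈ r, PySem.Str.strip y = y ∧ y ≠ "" := by
    intro y hy
    rw [hr] at hy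
    have h1 := List.mem_of_mem_filter hy
    have h2 := List.of_mem_filter hy
    obtain ⟨x, _, rfl⟩ := List.mem_map.mp h1
    exact ⟨pv_strip_idem x, by simpa using h2⟩
  have hclean : ∀ y ∈ ordered ++ r, PySem.Str.strip y = y ∧ y ≠ "" := by
    intro y hy
    rcases List.mem_append.mp hy with h | h
    · exact pv_canon_clean y (List.mem_of_mem_filter (hordered ▸ h))
    · exact hclean_r y h
  have hA : (List.foldl
      (fun (acc : PySem.Set String × List String) field =>
        if PySem.Str.strip field = "" ∨ PySem.Set.contains acc.1 (PySem.Str.strip field) then acc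
        else (PySem.Set.add acc.1 (PySem.Str.strip field), acc.2 ++ [PySem.Str.strip field]))
      (PySem.Set.empty, []) (ordered ++ r)).2 = pvDD [] (ordered ++ r) := by
    have := pv_foldA (ordered ++ r) hclean [] []
    simpa [PySem.Set.empty] using this
  rw [hA, pvDD_append]
  have hord_nodup : ordered.Nodup := hordered ▸ pv_canon_nodup.filter _
  have hord : pvDD [] ordered = ordered := pvDD_eq_self ordered [] hord_nodup (by simp)
  rw [hord, List.nil_append]
  have hu : PySem.List.dedup r = pvDD [] r := pv_dedup_eq r
  rw [hu]
  rw [pv_sorted_split k (pvCanonAll.length : Int) pvCanonAll pv_rank_pairwise pv_rank_in pv_rank_out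
    (pvDD [] r) (pvDD_nodup r [])]
  congr 1
  · rw [hordered]
    apply List.filter_congr
    intro z hz
    have : z ∈ pvDD [] r ↔ z ∈ r := by
      rw [pvDD_mem]; simp
    simp [List.contains_iff_mem, this]
  · rw [pvDD_filter r ordered [] (by simp)]
    apply List.filter_congr
    intro z hz
    have hzr : z ∈ r := ((pvDD_mem r [] z).mp hz).1
    have : z ∈ ordered ↔ z ∈ pvCanonAll := by
      rw [hordered, List.mem_filter]
      simp [List.contains_iff_mem, hzr]
    simp [this]
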